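-- pv_equiv track=rewrite | github.com/cyberLaVoy/kattis | python3/aClassyProblem.py | convertClassToInt
-- ===== SOURCE A (Python) =====
-- def convertClassToInt(clss):
--     s = ""
--     for c in clss.split('-'):
--         if c == "upper":
--             s += '3'
--         if c == "middle":
--             s += '2'
--         if c == "lower":
--             s += '1'
--     s = s[::-1]
--     return int(s+('2'*(10-len(s))))
-- ===== SOURCE B (Python) =====
-- def convertClassToInt(clss):
--     DIGIT = {'upper': 3, 'middle': 2, 'lower': 1}
--     n = 0
--     k = 0
--     for tok in reversed(clss.split('-')):
--         d = DIGIT.get(tok)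
--         if d is not None:
--             n = n * 10 + d
--             k += 1
--     pad = 10 - k
--     if pad <= 0:
--         return n
--     return n * 10 ** pad + 2 * (10 ** pad - 1) // 9
-- ===== Notes on version B (the rewrite author's own statement) =====
-- stated objective: alternative
-- what changed: Replaces string building (append digit chars, reverse the string, pad with filler chars, parse with int()) by pure positional arithmetic: a dict maps tokens to digits, the tokens are folded in reversed order as n = n*10 + d while counting matches, and the padding becomes n*10**pad + 2*(10**pad-1)//9.
import Mathlib
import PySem

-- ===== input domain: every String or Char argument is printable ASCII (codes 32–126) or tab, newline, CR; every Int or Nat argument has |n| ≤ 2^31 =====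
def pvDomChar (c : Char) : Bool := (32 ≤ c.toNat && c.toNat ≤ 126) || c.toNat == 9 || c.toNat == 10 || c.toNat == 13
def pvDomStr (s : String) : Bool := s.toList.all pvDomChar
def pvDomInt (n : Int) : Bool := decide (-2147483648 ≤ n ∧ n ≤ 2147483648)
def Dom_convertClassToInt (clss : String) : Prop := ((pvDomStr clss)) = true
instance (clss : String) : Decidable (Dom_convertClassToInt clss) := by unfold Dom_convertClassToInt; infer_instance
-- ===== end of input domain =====

-- B replaces A's string building (append digit chars, reverse, pad, int()) by positional
-- arithmetic over the reversed token list: a different decomposition, same O(n) cost.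

-- ===== PORT A =====
-- A only ever calls int() on a nonempty string of ASCII digits built by its own loop; on such
-- strings int() is exactly this decimal fold (PySem.Int.ofChars? computes the same value there,
-- but its digit-parsing helpers are private to the prelude, so the fold is written out; it is
-- exact on every string this port passes it).
def pvIntOfDigits (cs : List Char) : Int := cs.foldl (fun n c => n * 10 + ((c.toNat : Int) - 48)) 0

def convertClassToInt (clss : String) : Int :=
  let s : List Char := (PySem.Chars.splitOn clss.toList ['-']).foldl
    (fun s c =>
      let s := if c == ['u','p','p','e','r'] then s ++ ['3'] else s
      let s := if c == ['m','i','d','d','l','e'] then s ++ ['2'] else s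
      let s := if c == ['l','o','w','e','r'] then s ++ ['1'] else s
      s) []
  let s := s.reverse
  pvIntOfDigits (s ++ List.replicate (10 - s.length) '2')

-- ===== PORT B =====
def pvDigitDict : PySem.Dict (List Char) Int :=
  PySem.Dict.ofList [(['u','p','p','e','r'], 3), (['m','i','d','d','l','e'], 2), (['l','o','w','e','r'], 1)]

def convertClassToInt_alt (clss : String) : Int :=
  let p : Int × Int := ((PySem.Chars.splitOn clss.toList ['-']).reverse).foldl
    (fun (p : Int × Int) tok =>
      match pvDigitDict.get? tok with
      | some d => (p.1 * 10 + d, p.2 + 1)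
      | none => p) (0, 0)
  let pad : Int := 10 - p.2
  if pad ≤ 0 then p.1
  else p.1 * 10 ^ pad.toNat + PySem.Int.floordiv (2 * (10 ^ pad.toNat - 1)) 9

-- ===== PRECONDITION & SPEC =====
def Spec_convertClassToInt (clss : String) (out : Int) : Prop := out = convertClassToInt_alt clss
instance (clss : String) (out : Int) : Decidable (Spec_convertClassToInt clss out) := by unfold Spec_convertClassToInt; infer_instance

-- ===== CLAIM (what is proved, stated in full; the proofs are below) =====
def Claim_equal_convertClassToInt : Prop := ∀ (clss : String), Dom_convertClassToInt clss → Spec_convertClassToInt clss (convertClassToInt clss)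

-- ===== LEMMAS AND PROOFS =====

-- the digit a token contributes (none for unmatched tokens)
def pvTok (c : List Char) : Option Int :=
  if c = ['u','p','p','e','r'] then some 3 else if c = ['m','i','d','d','l','e'] then some 2
  else if c = ['l','o','w','e','r'] then some 1 else none

def pvTokDigits (c : List Char) : List Int :=
  match pvTok c with | some d => [d] | none => []

def pvDigitChar (d : Int) : Char := Char.ofNat (48 + d.toNat)

def pvTokChars (c : List Char) : List Char := (pvTokDigits c).map pvDigitChar

def pvNum (n : Int) (ds : List Int) : Int := ds.foldl (fun n d => n * 10 + d) n

def pvRepTwo : Nat → Int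
  | 0 => 0
  | p + 1 => pvRepTwo p * 10 + 2

lemma pvRepTwo_nine (p : Nat) : 9 * pvRepTwo p = 2 * (10 ^ p - 1) := by
  induction p with
  | zero => simp [pvRepTwo]
  | succ p ih => simp only [pvRepTwo, pow_succ]; ring_nf; ring_nf at ih; omega

lemma pvStepA (s : List Char) (c : List Char) :
    (let s := if c == ['u','p','p','e','r'] then s ++ ['3'] else s
     let s := if c == ['m','i','d','d','l','e'] then s ++ ['2'] else s
     let s := if c == ['l','o','w','e','r'] then s ++ ['1'] else s
     s) = s ++ pvTokChars c := by
  by_cases h1 : c = ['u','p','p','e','r']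
  · simp [h1, pvTokChars, pvTokDigits, pvTok, pvDigitChar]
  · by_cases h2 : c = ['m','i','d','d','l','e']
    · simp [h2, pvTokChars, pvTokDigits, pvTok, pvDigitChar]
    · by_cases h3 : c = ['l','o','w','e','r']
      · simp [h3, pvTokChars, pvTokDigits, pvTok, pvDigitChar]
      · simp [h1, h2, h3, pvTokChars, pvTokDigits, pvTok]

lemma pvDictGet (c : List Char) : pvDigitDict.get? c = pvTok c := by
  have hd : pvDigitDict = PySem.Dict.mk
      [(['u','p','p','e','r'], 3), (['m','i','d','d','l','e'], 2), (['l','o','w','e','r'], 1)] := by decide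
  rw [hd]
  by_cases h1 : c = ['u','p','p','e','r']
  · simp [h1, PySem.Dict.get?_mk_cons, pvTok]
  · by_cases h2 : c = ['m','i','d','d','l','e']
    · simp [h2, PySem.Dict.get?_mk_cons, pvTok]
    · by_cases h3 : c = ['l','o','w','e','r']
      · simp [h3, PySem.Dict.get?_mk_cons, pvTok]
      · simp [pvTok, h1, h2, h3, Ne.symm h1, Ne.symm h2, Ne.symm h3, PySem.Dict.get?]

lemma pvTokDigits_mem (c : List Char) (d : Int) (h : d ∈ pvTokDigits c) : d = 1 ∨ d = 2 ∨ d = 3 := by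
  simp only [pvTokDigits, pvTok] at h
  split_ifs at h <;> simp_all

-- B's loop over a token list computes pvNum over the contributed digits and their count
lemma pvLoopB (ts : List (List Char)) (n k : Int) :
    ts.foldl (fun (p : Int × Int) tok =>
      match pvDigitDict.get? tok with
      | some d => (p.1 * 10 + d, p.2 + 1)
      | none => p) (n, k)
    = (pvNum n (ts.flatMap pvTokDigits), k + (ts.flatMap pvTokDigits).length) := by
  induction ts generalizing n k with
  | nil => simp [pvNum]
  | cons t ts ih =>
    simp only [List.foldl_cons, List.flatMap_cons, pvDictGet t]
    rcases h : pvTok t with _ | d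
    · simp [pvTokDigits, h, ih]
    · simp only [pvTokDigits, h, List.singleton_append, List.foldl_cons, ih, pvNum,
        List.length_cons]
      simp only [Prod.mk.injEq, true_and]
      push_cast
      ring

-- the digit-char fold agrees with pvNum on digit lists from {1,2,3}
lemma pvFoldDigits (ds : List Int) (n : Int) (h : ∀ d ∈ ds, d = 1 ∨ d = 2 ∨ d = 3) :
    (ds.map pvDigitChar).foldl (fun n c => n * 10 + ((c.toNat : Int) - 48)) n = pvNum n ds := by
  induction ds generalizing n with
  | nil => rfl
  | cons d ds ih =>
    have hd := h d (by simp)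
    have hv : (((pvDigitChar d).toNat : Int)) - 48 = d := by
      rcases hd with h | h | h <;> subst h <;> decide
    simp only [List.map_cons, List.foldl_cons, pvNum, hv]
    exact ih _ (fun x hx => h x (by simp [hx]))

-- folding over the '2'-padding
lemma pvFoldPad (p : Nat) (n : Int) :
    (List.replicate p '2').foldl (fun n c => n * 10 + ((c.toNat : Int) - 48)) n
    = n * 10 ^ p + pvRepTwo p := by
  induction p generalizing n with
  | zero => simp [pvRepTwo]
  | succ p ih =>
    rw [List.replicate_succ, List.foldl_cons, ih]
    show (n * 10 + ((('2'.toNat : Int)) - 48)) * 10 ^ p + pvRepTwo p = n * 10 ^ (p + 1) + pvRepTwo (p + 1)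
    have h2 : (('2'.toNat : Int)) - 48 = 2 := by decide
    rw [h2]
    have h9 := pvRepTwo_nine p
    simp only [pvRepTwo, pow_succ]
    nlinarith [h9]

lemma pvRepTwo_eq (p : Nat) : PySem.Int.floordiv (2 * (10 ^ p - 1)) 9 = pvRepTwo p := by
  have h9 := pvRepTwo_nine p
  rw [(PySem.Int.floordiv_eq_iff_of_pos (by norm_num) :
    PySem.Int.floordiv (2 * (10 ^ p - 1)) 9 = pvRepTwo p ↔ _)]
  omega

lemma pvTokDigits_rev (c : List Char) : (pvTokDigits c).reverse = pvTokDigits c := by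
  simp only [pvTokDigits]
  rcases pvTok c with _ | d <;> rfl

-- ===== VERDICT (by name: the statement is the Claim_ definition above) =====
theorem convertClassToInt_spec : Claim_equal_convertClassToInt := by
  intro clss _
  unfold Spec_convertClassToInt convertClassToInt convertClassToInt_alt
  have hstep : (fun (s c : List Char) =>
      let s := if c == ['u','p','p','e','r'] then s ++ ['3'] else s
      let s := if c == ['m','i','d','d','l','e'] then s ++ ['2'] else s
      let s := if c == ['l','o','w','e','r'] then s ++ ['1'] else s
      s) = fun s c => s ++ pvTokChars c := by
    funext s c; exact pvStepA s c
  rw [hstep, PySem.List.foldl_append_eq_flatMap, pvLoopB]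
  set ts := PySem.Chars.splitOn clss.toList ['-'] with hts
  set ds := ts.flatMap pvTokDigits with hds
  have hchars : ts.flatMap pvTokChars = ds.map pvDigitChar := by
    rw [hds, List.map_flatMap]
    rfl
  have hrevd : ts.reverse.flatMap pvTokDigits = ds.reverse := by
    rw [List.flatMap_reverse, hds]
    have h1 : (List.reverse ∘ pvTokDigits) = pvTokDigits := funext pvTokDigits_rev
    rw [h1]
  have hmem : ∀ d ∈ ds.reverse, d = 1 ∨ d = 2 ∨ d = 3 := by
    intro d hd
    rw [List.mem_reverse, hds, List.mem_flatMap] at hd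
    obtain ⟨c, _, hc⟩ := hd
    exact pvTokDigits_mem c d hc
  rw [hchars, hrevd]
  simp only [List.nil_append, ← List.map_reverse, List.length_map, List.length_reverse]
  unfold pvIntOfDigits
  rw [List.foldl_append, pvFoldDigits _ _ hmem, pvFoldPad]
  set n := pvNum 0 ds.reverse with hn
  set L := ds.length with hL
  by_cases hc : (10:Int) - ((0:Int) + (L:Int)) ≤ 0
  · have h0 : 10 - L = 0 := by omega
    simp [h0, pvRepTwo]
  · have htn : ((10:Int) - ((0:Int) + (L:Int))).toNat = 10 - L := by omega
    simp only [if_neg hc, htn, pvRepTwo_eq]
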